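-- pv_equiv track=rewrite | github.com/TechDigiSoftware2024/miracle_world_api | app/utils/partner_team.py | partners_by_introducer
-- ===== SOURCE A (Python) =====
-- def _partner_pk(row: dict, pk_col: str) -> str:
--     return str(row.get(pk_col) or row.get("agentId") or row.get("partnerId") or "").strip()
--
-- def partners_by_introducer(rows: list[dict], pk_col: str) -> dict[str, list[dict]]:
--     out: dict[str, list[dict]] = {}
--     for row in rows:
--         pid = _partner_pk(row, pk_col)
--         if not pid:
--             continue
--         intro = str(row.get("introducer") or "").strip()
--         out.setdefault(intro, []).append(row)
--     for k in out:
--         out[k].sort(key=lambda x: _partner_pk(x, pk_col))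
--     return out
-- ===== SOURCE B (Python) =====
-- def _partner_pk(row: dict, pk_col: str) -> str:
--     return str(row.get(pk_col) or row.get("agentId") or row.get("partnerId") or "").strip()
--
-- def partners_by_introducer(rows: list[dict], pk_col: str) -> dict[str, list[dict]]:
--     # keep only rows with a non-empty pk
--     kept = [row for row in rows if _partner_pk(row, pk_col)]
--     # key order = first appearance of each introducer among kept rows
--     out: dict[str, list[dict]] = {str(row.get("introducer") or "").strip(): [] for row in kept}
--     # one global stable sort by pk; distributing preserves per-group pk order and tie stability
--     for row in sorted(kept, key=lambda x: _partner_pk(x, pk_col)):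
--         out[str(row.get("introducer") or "").strip()].append(row)
--     return out
-- ===== Notes on version B (the rewrite author's own statement) =====
-- stated objective: alternative
-- what changed: Instead of grouping rows into per-introducer lists and then sorting each group separately, B filters the rows with a non-empty pk, performs one global stable sort of that list by pk, and distributes rows into pre-created groups in a single pass, relying on sort stability for per-group order and ties.
import Mathlib
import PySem

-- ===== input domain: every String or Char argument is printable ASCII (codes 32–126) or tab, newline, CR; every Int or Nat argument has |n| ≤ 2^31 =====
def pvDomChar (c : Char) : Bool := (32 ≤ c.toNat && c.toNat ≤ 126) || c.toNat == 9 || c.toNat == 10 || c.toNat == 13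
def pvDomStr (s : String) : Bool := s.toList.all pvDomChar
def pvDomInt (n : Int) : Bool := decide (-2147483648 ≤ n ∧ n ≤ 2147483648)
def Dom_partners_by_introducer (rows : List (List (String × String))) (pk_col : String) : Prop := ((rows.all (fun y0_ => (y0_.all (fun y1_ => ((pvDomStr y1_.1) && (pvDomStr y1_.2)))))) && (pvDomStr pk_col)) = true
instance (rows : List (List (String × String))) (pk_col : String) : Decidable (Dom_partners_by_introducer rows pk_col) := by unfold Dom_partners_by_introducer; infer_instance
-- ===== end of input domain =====

-- B replaces A's per-group list sorts by one global stable sort of the kept rows, then distributes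
-- rows into pre-created groups in a single pass (objective: alternative decomposition, same cost).


-- ===== PORT A =====
-- `a or b` on strings (None from .get is folded into "" by .getD; None and "" are both falsy here)
def pvOrS (a b : String) : String := if a = "" then b else a

-- _partner_pk(row, pk_col): first truthy of row.get(pk_col)/agentId/partnerId, else "", stripped
def pvPartnerPk (row : List (String × String)) (pk_col : String) : String :=
  PySem.Str.strip (pvOrS (pvOrS (pvOrS ((row.lookup pk_col).getD "") ((row.lookup "agentId").getD "")) ((row.lookup "partnerId").getD "")) "")

-- str(row.get("introducer") or "").strip()
def pvIntro (row : List (String × String)) : String :=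
  PySem.Str.strip (pvOrS ((row.lookup "introducer").getD "") "")

def partners_by_introducer (rows : List (List (String × String))) (pk_col : String) : List (String × List (List (String × String))) :=
  -- first loop: out.setdefault(intro, []).append(row)  (skip empty pid)
  let out := rows.foldl (fun d row =>
      let pid := pvPartnerPk row pk_col
      if pid = "" then d
      else d.modify (pvIntro row) [] (fun l => l ++ [row])) PySem.Dict.empty
  -- second loop: for k in out: out[k].sort(key=lambda x: _partner_pk(x, pk_col))
  out.items.map (fun kv => (kv.1, PySem.List.sorted kv.2 (fun x => pvPartnerPk x pk_col)))

-- ===== PORT B =====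
def partners_by_introducer_alt (rows : List (List (String × String))) (pk_col : String) : List (String × List (List (String × String))) :=
  -- kept = [row for row in rows if _partner_pk(row, pk_col)]
  let kept := rows.filter (fun row => !(pvPartnerPk row pk_col == ""))
  -- out = {intro(row): [] for row in kept}
  let out0 := kept.foldl (fun d row => d.insert (pvIntro row) ([] : List (List (String × String)))) PySem.Dict.empty
  -- for row in sorted(kept, key=pk): out[intro(row)].append(row)   (key always present; modify totalises the lookup)
  let out := (PySem.List.sorted kept (fun x => pvPartnerPk x pk_col)).foldl
      (fun d row => d.modify (pvIntro row) [] (fun l => l ++ [row])) out0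
  out.items

-- ===== PRECONDITION & SPEC =====
def Spec_partners_by_introducer (rows : List (List (String × String))) (pk_col : String) (out : List (String × List (List (String × String)))) : Prop := out = partners_by_introducer_alt rows pk_col
instance (rows : List (List (String × String))) (pk_col : String) (out : List (String × List (List (String × String)))) : Decidable (Spec_partners_by_introducer rows pk_col out) := by unfold Spec_partners_by_introducer; infer_instance

-- ===== CLAIM (what is proved, stated in full; the proofs are below) =====
def Claim_equal_partners_by_introducer : Prop := ∀ (rows : List (List (String × String))) (pk_col : String), Dom_partners_by_introducer rows pk_col → Spec_partners_by_introducer rows pk_col (partners_by_introducer rows pk_col)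

-- ===== LEMMAS AND PROOFS =====

theorem pv_dedup_append {α : Type} [BEq α] [LawfulBEq α] (l : List α) (a : α) :
    PySem.List.dedup (l ++ [a]) = if a ∈ l then PySem.List.dedup l else PySem.List.dedup l ++ [a] := by
  have h : PySem.List.dedup (l ++ [a]) = PySem.Set.add (PySem.List.dedup l) a := by
    simp [PySem.List.dedup, PySem.Set.ofList, List.foldl_append]
  rw [h, PySem.Set.add, PySem.Set.contains]
  by_cases hm : a ∈ l
  · simp [hm]
  · simp [hm]

-- first-match lookup in a dict whose items are a map over Nodup keys
theorem pv_get?_mk_map {α : Type} (g : String → List α) (ks : List String) (k : String)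
    (hnd : ks.Nodup) (hk : k ∈ ks) :
    (PySem.Dict.mk (ks.map (fun k => (k, g k)))).get? k = some (g k) := by
  induction ks with
  | nil => simp at hk
  | cons k0 ks ih =>
    rw [List.map_cons, PySem.Dict.get?_mk_cons]
    rcases List.mem_cons.1 hk with h | h
    · subst h; simp
    · have : k0 ≠ k := by rintro rfl; exact (List.nodup_cons.1 hnd).1 h
      simp [this, ih (List.nodup_cons.1 hnd).2 h]

theorem pv_contains_mk_map {α : Type} (g : String → List α) (ks : List String) (k : String) :
    (PySem.Dict.mk (ks.map (fun k => (k, g k)))).contains k = decide (k ∈ ks) := by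
  simp [PySem.Dict.contains, List.any_map]
  induction ks with
  | nil => simp
  | cons a t ih =>
    simp only [List.any_cons, ih, List.mem_cons]
    by_cases h : a = k
    · simp [h]
    · simp [h, Ne.symm h]

theorem pv_not_mem_filter_nil {α : Type} (f : α → String) (pref : List α) (k : String)
    (h : ¬ k ∈ pref.map f) : pref.filter (fun x => f x == k) = [] := by
  rw [List.filter_eq_nil_iff]
  intro x hx hfx
  exact h (List.mem_map.2 ⟨x, hx, by simpa using hfx⟩)

-- one modify-append step on a grouping dict (key present: extend its group; absent: new group at the end)
theorem pv_grp_step {α : Type} (f : α → String) (pref : List α) (x : α) :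
    (PySem.Dict.mk ((PySem.List.dedup (pref.map f)).map (fun k => (k, pref.filter (fun x => f x == k))))).modify (f x) [] (fun l => l ++ [x])
      = PySem.Dict.mk ((PySem.List.dedup ((pref ++ [x]).map f)).map (fun k => (k, (pref ++ [x]).filter (fun y => f y == k)))) := by
  rw [PySem.Dict.modify, PySem.Dict.insert]
  have hrhs : (PySem.List.dedup ((pref ++ [x]).map f)).map (fun k => (k, (pref ++ [x]).filter (fun y => f y == k)))
      = (if f x ∈ pref.map f then PySem.List.dedup (pref.map f) else PySem.List.dedup (pref.map f) ++ [f x]).map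
          (fun k => (k, (pref ++ [x]).filter (fun y => f y == k))) := by
    simp only [List.map_append, List.map_cons, List.map_nil]
    rw [pv_dedup_append]
  by_cases hm : f x ∈ pref.map f
  · have hc : (PySem.Dict.mk ((PySem.List.dedup (pref.map f)).map (fun k => (k, pref.filter (fun x => f x == k))))).contains (f x) = true := by
      rw [pv_contains_mk_map]; simp [hm]
    have hget : (PySem.Dict.mk ((PySem.List.dedup (pref.map f)).map (fun k => (k, pref.filter (fun x => f x == k))))).getD (f x) [] = pref.filter (fun y => f y == f x) := by
      rw [PySem.Dict.getD, pv_get?_mk_map _ _ _ (PySem.List.nodup_dedup _) (by simp [hm])]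
      rfl
    rw [hc, if_pos rfl, hget]
    apply congrArg PySem.Dict.mk
    rw [hrhs, if_pos hm, List.map_map]
    apply List.map_congr_left
    intro k hk
    by_cases he : k = f x
    · subst he; simp [List.filter_append]
    · simp only [Function.comp]
      rw [if_neg (by simpa using he), List.filter_append]
      simp [Ne.symm he]
  · have hc : (PySem.Dict.mk ((PySem.List.dedup (pref.map f)).map (fun k => (k, pref.filter (fun x => f x == k))))).contains (f x) = false := by
      rw [pv_contains_mk_map]; simp [hm]
    have hget : (PySem.Dict.mk ((PySem.List.dedup (pref.map f)).map (fun k => (k, pref.filter (fun x => f x == k))))).getD (f x) [] = ([] : List α) := by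
      rw [PySem.Dict.getD, PySem.Dict.get?]
      have : ((PySem.List.dedup (pref.map f)).map (fun k => (k, pref.filter (fun x => f x == k)))).find? (fun p => p.1 == f x) = none := by
        rw [List.find?_eq_none]
        intro p hp
        rcases List.mem_map.1 hp with ⟨k, hk, rfl⟩
        simp only [beq_iff_eq]
        rintro rfl
        exact hm ((PySem.List.mem_dedup _ _).1 hk)
      rw [this]; rfl
    rw [hc, hget]
    simp only [Bool.false_eq_true, if_false]
    apply congrArg PySem.Dict.mk
    rw [hrhs, if_neg hm, List.map_append, List.map_cons, List.map_nil]
    congr 1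
    · apply List.map_congr_left
      intro k hk
      have hne : ¬ (f x == k) = true := by
        simp only [beq_iff_eq]; rintro rfl; exact hm ((PySem.List.mem_dedup _ _).1 hk)
      rw [List.filter_append]
      simp [hne]
    · rw [List.filter_append]
      simp [pv_not_mem_filter_nil f pref _ hm]

-- A's first loop builds exactly the grouping dict (keys in first-appearance order, groups in row order)
theorem pv_foldA {α : Type} (f : α → String) (xs : List α) : ∀ pref,
    xs.foldl (fun d x => d.modify (f x) [] (fun l => l ++ [x])) (PySem.Dict.mk ((PySem.List.dedup (pref.map f)).map (fun k => (k, pref.filter (fun x => f x == k)))))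
      = PySem.Dict.mk ((PySem.List.dedup ((pref ++ xs).map f)).map (fun k => (k, (pref ++ xs).filter (fun x => f x == k)))) := by
  induction xs with
  | nil => intro pref; simp
  | cons x xs ih =>
    intro pref
    rw [List.foldl_cons, pv_grp_step, ih (pref ++ [x])]
    simp

-- B's dict comprehension: all keys in first-appearance order, empty groups
theorem pv_foldB0 {α : Type} (f : α → String) (xs : List α) : ∀ pref,
    xs.foldl (fun d x => d.insert (f x) ([] : List α))
        (PySem.Dict.mk ((PySem.List.dedup (pref.map f)).map (fun k => (k, ([] : List α)))))
      = PySem.Dict.mk ((PySem.List.dedup ((pref ++ xs).map f)).map (fun k => (k, ([] : List α)))) := by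
  induction xs with
  | nil => intro pref; simp
  | cons x xs ih =>
    intro pref
    have hstep : (PySem.Dict.mk ((PySem.List.dedup (pref.map f)).map (fun k => (k, ([] : List α))))).insert (f x) []
        = PySem.Dict.mk ((PySem.List.dedup ((pref ++ [x]).map f)).map (fun k => (k, ([] : List α)))) := by
      rw [PySem.Dict.insert, pv_contains_mk_map]
      have hd : PySem.List.dedup ((pref ++ [x]).map f)
          = if f x ∈ pref.map f then PySem.List.dedup (pref.map f) else PySem.List.dedup (pref.map f) ++ [f x] := by
        simp only [List.map_append, List.map_cons, List.map_nil]
        rw [pv_dedup_append]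
      by_cases hm : f x ∈ pref.map f
      · rw [if_pos (by simp; simpa using hm)]
        apply congrArg PySem.Dict.mk
        rw [hd, if_pos hm, List.map_map]
        apply List.map_congr_left
        intro k hk
        by_cases he : k = f x <;> simp [he]
      · rw [if_neg (by simp; simpa using hm), hd, if_neg hm]
        apply congrArg PySem.Dict.mk
        simp
    rw [List.foldl_cons, hstep, ih (pref ++ [x])]
    simp

-- B's filling loop: keys stay fixed, each group grows by the rows that land in it
theorem pv_foldB {α : Type} (f : α → String) (xs : List α) (ks : List String)
    (hnd : ks.Nodup) : ∀ pref, (∀ x ∈ xs, f x ∈ ks) →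
    xs.foldl (fun d x => d.modify (f x) [] (fun l => l ++ [x]))
        (PySem.Dict.mk (ks.map (fun k => (k, pref.filter (fun x => f x == k)))))
      = PySem.Dict.mk (ks.map (fun k => (k, (pref ++ xs).filter (fun x => f x == k)))) := by
  induction xs with
  | nil => intro pref _; simp
  | cons x xs ih =>
    intro pref hmem
    have hx : f x ∈ ks := hmem x (by simp)
    have hstep : (PySem.Dict.mk (ks.map (fun k => (k, pref.filter (fun y => f y == k))))).modify (f x) [] (fun l => l ++ [x])
        = PySem.Dict.mk (ks.map (fun k => (k, (pref ++ [x]).filter (fun y => f y == k)))) := by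
      rw [PySem.Dict.modify, PySem.Dict.insert, pv_contains_mk_map, if_pos (by simpa)]
      have hget : (PySem.Dict.mk (ks.map (fun k => (k, pref.filter (fun y => f y == k))))).getD (f x) []
          = pref.filter (fun y => f y == f x) := by
        rw [PySem.Dict.getD, pv_get?_mk_map _ _ _ hnd hx]; rfl
      rw [hget]
      apply congrArg PySem.Dict.mk
      rw [List.map_map]
      apply List.map_congr_left
      intro k hk
      by_cases he : k = f x
      · subst he; simp [List.filter_append]
      · simp only [Function.comp]
        rw [if_neg (by simpa using he), List.filter_append]
        simp [Ne.symm he]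
    rw [List.foldl_cons, hstep, ih (pref ++ [x]) (fun y hy => hmem y (by simp [hy]))]
    simp

theorem pv_insertBy_front {α κ : Type} [LinearOrder κ] (K : α → κ) (x : α) (zs : List α)
    (h : ∀ z ∈ zs, K x < K z) :
    PySem.List.insertBy (fun a b => decide (K a < K b)) x zs = x :: zs := by
  cases zs with
  | nil => rfl
  | cons z zs =>
    rw [PySem.List.insertBy]
    simp [h z (by simp)]

-- insertion into a ≤-sorted list commutes with filter
theorem pv_insertBy_filter {α κ : Type} [LinearOrder κ] (K : α → κ) (p : α → Bool) (x : α) (ys : List α)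
    (hs : ys.Pairwise (fun a b => K a ≤ K b)) :
    (PySem.List.insertBy (fun a b => decide (K a < K b)) x ys).filter p
      = if p x then PySem.List.insertBy (fun a b => decide (K a < K b)) x (ys.filter p) else ys.filter p := by
  induction ys with
  | nil =>
    by_cases hp : p x <;> simp [PySem.List.insertBy, List.filter, hp]
  | cons y ys ih =>
    rw [PySem.List.insertBy]
    rcases List.pairwise_cons.1 hs with ⟨hy, hs'⟩
    by_cases hlt : K x < K y
    · rw [if_pos (by simpa using hlt)]
      by_cases hp : p x
      · rw [if_pos hp]
        have hfront : PySem.List.insertBy (fun a b => decide (K a < K b)) x ((y :: ys).filter p) = x :: (y :: ys).filter p := by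
          apply pv_insertBy_front
          intro z hz
          rcases List.mem_cons.1 (List.mem_of_mem_filter hz) with rfl | hz'
          · exact hlt
          · exact lt_of_lt_of_le hlt (hy z hz')
        rw [hfront, List.filter_cons, if_pos hp]
      · rw [if_neg hp, List.filter_cons, if_neg (by simpa using hp)]
    · rw [if_neg (by simpa using hlt)]
      by_cases hpy : p y
      · rw [List.filter_cons, if_pos hpy, List.filter_cons, if_pos hpy, ih hs']
        by_cases hp : p x
        · rw [if_pos hp, if_pos hp, PySem.List.insertBy, if_neg (by simpa using hlt)]
        · rw [if_neg hp, if_neg hp]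
      · rw [List.filter_cons, if_neg (by simpa using hpy), ih hs']
        simp [hpy]

-- Python's stable sort commutes with filter: sorting then filtering = filtering then sorting
theorem pv_sorted_filter {α κ : Type} [LinearOrder κ] (K : α → κ) (p : α → Bool) (xs : List α) :
    (PySem.List.sorted xs K).filter p = PySem.List.sorted (xs.filter p) K := by
  induction xs using List.reverseRecOn with
  | nil => rfl
  | append_singleton xs x ih =>
    rw [PySem.List.sorted_eq_foldl_insertBy, List.foldl_append, List.foldl_cons, List.foldl_nil,
        ← PySem.List.sorted_eq_foldl_insertBy,
        pv_insertBy_filter K p x _ (PySem.List.sorted_pairwise xs K), ih, List.filter_append]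
    by_cases hp : p x
    · rw [if_pos hp]
      simp only [List.filter_cons, hp, if_pos, List.filter_nil]
      rw [PySem.List.sorted_eq_foldl_insertBy (xs.filter p ++ [x]), List.foldl_append, List.foldl_cons, List.foldl_nil, ← PySem.List.sorted_eq_foldl_insertBy]
    · rw [if_neg hp]
      simp [hp]

theorem pv_main (rows : List (List (String × String))) (pk_col : String) :
    partners_by_introducer rows pk_col = partners_by_introducer_alt rows pk_col := by
  simp only [partners_by_introducer, partners_by_introducer_alt]
  set kept := rows.filter (fun row => !(pvPartnerPk row pk_col == "")) with hkept
  set f := pvIntro with hf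
  set K := fun x => pvPartnerPk x pk_col with hK
  -- A's first loop is the grouping fold over kept
  have hAfold : rows.foldl (fun d row =>
      let pid := pvPartnerPk row pk_col
      if pid = "" then d
      else d.modify (f row) [] (fun l => l ++ [row])) PySem.Dict.empty
      = kept.foldl (fun d row => d.modify (f row) [] (fun l => l ++ [row])) PySem.Dict.empty := by
    have hfun : (fun (d : PySem.Dict String (List (List (String × String)))) row =>
        let pid := pvPartnerPk row pk_col
        if pid = "" then d
        else d.modify (f row) [] (fun l => l ++ [row]))
        = (fun d row => if (!(pvPartnerPk row pk_col == "")) = true then d.modify (f row) [] (fun l => l ++ [row]) else d) := by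
      funext d row
      by_cases h : pvPartnerPk row pk_col = "" <;> simp [h]
    rw [hfun, hkept, List.foldl_filter]
  have hempty : (PySem.Dict.empty : PySem.Dict String (List (List (String × String))))
      = PySem.Dict.mk (((PySem.List.dedup (([] : List (List (String × String))).map f)).map (fun k => (k, ([] : List (List (String × String))).filter (fun x => f x == k))))) := rfl
  have hA : (rows.foldl (fun d row =>
      let pid := pvPartnerPk row pk_col
      if pid = "" then d
      else d.modify (f row) [] (fun l => l ++ [row])) PySem.Dict.empty)
      = PySem.Dict.mk ((PySem.List.dedup (kept.map f)).map (fun k => (k, kept.filter (fun x => f x == k)))) := by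
    rw [hAfold, hempty, pv_foldA f kept []]
    simp
  rw [hA]
  -- B's two loops
  have hB0 : kept.foldl (fun d row => d.insert (f row) ([] : List (List (String × String)))) PySem.Dict.empty
      = PySem.Dict.mk ((PySem.List.dedup (kept.map f)).map (fun k => (k, ([] : List (List (String × String)))))) := by
    have : (PySem.Dict.empty : PySem.Dict String (List (List (String × String))))
      = PySem.Dict.mk (((PySem.List.dedup (([] : List (List (String × String))).map f)).map (fun k => (k, ([] : List (List (String × String))))))) := rfl
    rw [this, pv_foldB0 f kept []]
    simp
  rw [hB0]
  have hB : (PySem.List.sorted kept K).foldl (fun d row => d.modify (f row) [] (fun l => l ++ [row]))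
        (PySem.Dict.mk ((PySem.List.dedup (kept.map f)).map (fun k => (k, ([] : List (List (String × String)))))))
      = PySem.Dict.mk ((PySem.List.dedup (kept.map f)).map (fun k => (k, (PySem.List.sorted kept K).filter (fun x => f x == k)))) := by
    have h0 : ((PySem.List.dedup (kept.map f)).map (fun k => (k, ([] : List (List (String × String))))))
        = ((PySem.List.dedup (kept.map f)).map (fun k => (k, ([] : List (List (String × String))).filter (fun x => f x == k)))) := rfl
    rw [h0, pv_foldB f (PySem.List.sorted kept K) (PySem.List.dedup (kept.map f)) (PySem.List.nodup_dedup _) []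
        (fun x hx => (PySem.List.mem_dedup _ _).2 (List.mem_map_of_mem ((PySem.List.mem_sorted _ _ _ _).1 hx)))]
    simp
  rw [hB]
  -- pointwise: per-group sort = filter of the global stable sort
  simp only [List.map_map]
  apply List.map_congr_left
  intro k hk
  simp only [Function.comp]
  rw [pv_sorted_filter]

-- ===== VERDICT (by name: the statement is the Claim_ definition above) =====
theorem partners_by_introducer_spec : Claim_equal_partners_by_introducer := by
  intro rows pk_col _
  unfold Spec_partners_by_introducer
  exact pv_main rows pk_col
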